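-- pv_equiv track=rewrite | github.com/evawenis/oscp-scripts | pysqllib/arguments.py | retr_column_dic
-- ===== SOURCE A (Python) =====
-- def retr_column_dic(raw_databases, raw_tables, raw_columns):
--     result = {}
--     for db, tb, cl in zip(raw_databases, raw_tables, raw_columns):
--         if db not in result:
--             result[db] = {}
--         if tb not in result[db]:
--             result[db][tb] = []
--         if cl not in result[db][tb]:
--             result[db][tb].append(cl)
--
--     return result
-- ===== SOURCE B (Python) =====
-- def retr_column_dic(raw_databases, raw_tables, raw_columns):
--     # Pass 1: group every column unconditionally.
--     result = {}
--     for db, tb, cl in zip(raw_databases, raw_tables, raw_columns):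
--         result.setdefault(db, {}).setdefault(tb, []).append(cl)
--     # Pass 2: replace each column list by its order-preserving dedup.
--     for tables in result.values():
--         for tb, cols in tables.items():
--             unique = []
--             for cl in cols:
--                 if cl not in unique:
--                     unique.append(cl)
--             tables[tb] = unique
--     return result
-- ===== Notes on version B (the rewrite author's own statement) =====
-- stated objective: alternative
-- what changed: A dedups inline with a membership check on every element during a single grouping loop; B groups all columns unconditionally in one pass and then walks the finished nested dict in a second pass, replacing each column list with its order-preserving dedup.
import Mathlib
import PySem

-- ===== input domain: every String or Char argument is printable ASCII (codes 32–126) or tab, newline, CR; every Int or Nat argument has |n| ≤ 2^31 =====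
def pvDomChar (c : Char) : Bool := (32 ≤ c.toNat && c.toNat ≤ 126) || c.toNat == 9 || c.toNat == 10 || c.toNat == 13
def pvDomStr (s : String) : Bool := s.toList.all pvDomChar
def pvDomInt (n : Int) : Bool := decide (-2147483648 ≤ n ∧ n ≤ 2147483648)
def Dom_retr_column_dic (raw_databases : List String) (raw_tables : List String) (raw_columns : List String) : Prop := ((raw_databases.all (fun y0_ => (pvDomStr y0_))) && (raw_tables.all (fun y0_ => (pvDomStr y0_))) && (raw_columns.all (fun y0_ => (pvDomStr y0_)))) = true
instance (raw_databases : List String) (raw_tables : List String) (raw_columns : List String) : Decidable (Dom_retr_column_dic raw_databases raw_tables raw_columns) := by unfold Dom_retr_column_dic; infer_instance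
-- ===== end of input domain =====

-- B replaces A's three per-element membership checks by a two-pass decomposition:
-- group all columns unconditionally, then dedup each column list in a second walk (objective: alternative).

-- ===== PORT A =====
-- one iteration of A's loop body over (db, tb, cl)
def pvStepA (r : PySem.Dict String (PySem.Dict String (List String))) (db tb cl : String) :
    PySem.Dict String (PySem.Dict String (List String)) :=
  let r1 := if r.contains db then r else r.insert db PySem.Dict.empty
  let r2 := if (r1.getD db PySem.Dict.empty).contains tb then r1
            else r1.insert db ((r1.getD db PySem.Dict.empty).insert tb [])
  let inner := r2.getD db PySem.Dict.empty
  let lst := inner.getD tb []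
  if cl ∈ lst then r2 else r2.insert db (inner.insert tb (lst ++ [cl]))

def retr_column_dic (raw_databases : List String) (raw_tables : List String) (raw_columns : List String) : List (String × List (String × List String)) :=
  (((raw_databases.zip raw_tables).zip raw_columns).foldl
      (fun r x => pvStepA r x.1.1 x.1.2 x.2) PySem.Dict.empty).items.map
    (fun p => (p.1, p.2.items))

-- ===== PORT B =====
-- Source B's inner dedup loop: fresh list, append only if not already present
def pvDedup (l : List String) : List String :=
  l.foldl (fun acc c => if c ∈ acc then acc else acc ++ [c]) []

-- one iteration of B's first pass: result.setdefault(db, {}).setdefault(tb, []).append(cl)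
def pvStepB (r : PySem.Dict String (PySem.Dict String (List String))) (db tb cl : String) :
    PySem.Dict String (PySem.Dict String (List String)) :=
  let inner := r.getD db PySem.Dict.empty
  r.insert db (inner.insert tb (inner.getD tb [] ++ [cl]))

def retr_column_dic_alt (raw_databases : List String) (raw_tables : List String) (raw_columns : List String) : List (String × List (String × List String)) :=
  let r := ((raw_databases.zip raw_tables).zip raw_columns).foldl
      (fun r x => pvStepB r x.1.1 x.1.2 x.2) PySem.Dict.empty
  -- second pass: replace every column list by its order-preserving dedup
  r.items.map (fun p => (p.1, p.2.items.map (fun q => (q.1, pvDedup q.2))))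

-- ===== PRECONDITION & SPEC =====
def Spec_retr_column_dic (raw_databases : List String) (raw_tables : List String) (raw_columns : List String) (out : List (String × List (String × List String))) : Prop := out = retr_column_dic_alt raw_databases raw_tables raw_columns
instance (raw_databases : List String) (raw_tables : List String) (raw_columns : List String) (out : List (String × List (String × List String))) : Decidable (Spec_retr_column_dic raw_databases raw_tables raw_columns out) := by unfold Spec_retr_column_dic; infer_instance

-- ===== CLAIM (what is proved, stated in full; the proofs are below) =====
def Claim_equal_retr_column_dic : Prop := ∀ (raw_databases : List String) (raw_tables : List String) (raw_columns : List String), Dom_retr_column_dic raw_databases raw_tables raw_columns → Spec_retr_column_dic raw_databases raw_tables raw_columns (retr_column_dic raw_databases raw_tables raw_columns)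

-- ===== LEMMAS AND PROOFS =====

-- map over the values of a dict (keys and order untouched)
def pvMapVals {κ ν ν' : Type} (f : ν → ν') (d : PySem.Dict κ ν) : PySem.Dict κ ν' :=
  PySem.Dict.mk (d.items.map (fun p => (p.1, f p.2)))

theorem pvMapVals_contains {κ ν ν' : Type} [BEq κ] (f : ν → ν') (d : PySem.Dict κ ν) (k : κ) :
    (pvMapVals f d).contains k = d.contains k := by
  simp [pvMapVals, PySem.Dict.contains, List.any_map, Function.comp_def]

theorem pvMapVals_get? {κ ν ν' : Type} [BEq κ] (f : ν → ν') (d : PySem.Dict κ ν) (k : κ) :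
    (pvMapVals f d).get? k = (d.get? k).map f := by
  rcases d with ⟨items⟩
  induction items with
  | nil => rfl
  | cons p rest ih =>
      simp only [pvMapVals, PySem.Dict.get?, List.map_cons, List.find?] at *
      by_cases h : (p.1 == k) = true
      · simp [h]
      · simp only [h] at *
        simpa using ih

theorem pvMapVals_keys {κ ν ν' : Type} (f : ν → ν') (d : PySem.Dict κ ν) :
    (pvMapVals f d).keys = d.keys := by
  simp [pvMapVals, PySem.Dict.keys, List.map_map, Function.comp]

theorem pvMapVals_insert {κ ν ν' : Type} [BEq κ] (f : ν → ν') (d : PySem.Dict κ ν) (k : κ) (v : ν) :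
    pvMapVals f (d.insert k v) = (pvMapVals f d).insert k (f v) := by
  by_cases h : d.contains k = true
  · have h2 : (pvMapVals f d).contains k = true := by rw [pvMapVals_contains]; exact h
    apply PySem.Dict.ext
    show (pvMapVals f (d.insert k v)).items = _
    rw [PySem.Dict.items_insert_of_contains _ _ h2]
    simp only [pvMapVals]
    rw [PySem.Dict.items_insert_of_contains _ _ h]
    simp only [List.map_map]
    apply List.map_congr_left
    intro p _
    by_cases hp : (p.1 == k) = true
    · simp [hp]
    · simp [hp, Function.comp_def]
  · have h' : d.contains k = false := by simpa using h
    have h2 : (pvMapVals f d).contains k = false := by rw [pvMapVals_contains]; exact h'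
    apply PySem.Dict.ext
    show (pvMapVals f (d.insert k v)).items = _
    rw [PySem.Dict.items_insert_of_not_contains _ _ h2]
    simp only [pvMapVals]
    rw [PySem.Dict.items_insert_of_not_contains _ _ h']
    simp

theorem pvInsert_insert_same {κ ν : Type} [BEq κ] [LawfulBEq κ] (d : PySem.Dict κ ν) (k : κ) (v w : ν) :
    (d.insert k v).insert k w = d.insert k w := by
  have h1 : (d.insert k v).contains k = true := PySem.Dict.contains_insert_self d k v
  by_cases h : d.contains k = true
  · apply PySem.Dict.ext
    rw [PySem.Dict.items_insert_of_contains _ _ h1, PySem.Dict.items_insert_of_contains _ _ h,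
        PySem.Dict.items_insert_of_contains _ _ h, List.map_map]
    apply List.map_congr_left
    intro p _
    by_cases hp : (p.1 == k) = true
    · simp [hp]
    · simp [hp, Function.comp_def]
  · have h' : d.contains k = false := by simpa using h
    apply PySem.Dict.ext
    rw [PySem.Dict.items_insert_of_contains _ _ h1,
        PySem.Dict.items_insert_of_not_contains _ _ h',
        PySem.Dict.items_insert_of_not_contains _ _ h', List.map_append]
    have hid : List.map (fun p => if (p.1 == k) = true then (k, w) else p) d.items = d.items := by
      conv_rhs => rw [← List.map_id d.items]
      apply List.map_congr_left
      intro p hp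
      have hpk : (p.1 == k) = false := by
        cases hb : (p.1 == k) with
        | false => rfl
        | true =>
            have hany : (d.items.any fun q => q.1 == k) = true := List.any_of_mem hp hb
            rw [PySem.Dict.contains] at h'
            rw [hany] at h'
            cases h'
      simp [hpk]
    simp [hid]

theorem pvInsert_same {κ ν : Type} [BEq κ] [LawfulBEq κ] (d : PySem.Dict κ ν) (k : κ) (v : ν)
    (hnd : d.keys.Nodup) (hg : d.get? k = some v) : d.insert k v = d := by
  apply PySem.Dict.ext
  have hc : d.contains k = true := by
    rw [PySem.Dict.contains_eq_isSome_get?, hg]; rfl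
  rw [PySem.Dict.items_insert_of_contains d v hc]
  have hmem : (k, v) ∈ d.items := PySem.Dict.mem_items_of_get?_eq_some d hg
  conv_rhs => rw [← List.map_id d.items]
  apply List.map_congr_left
  intro p hp
  by_cases h : (p.1 == k) = true
  · have hk : p.1 = k := by simpa using h
    -- nodup keys: p is the unique pair with key k, and (k, v) is such a pair
    have : p = (k, v) := by
      have h1 : p.2 = v := by
        have := PySem.Dict.get?_of_mem_items (d := d) (k := p.1) (v := p.2) (by simpa using hp) hnd
        rw [hk, hg] at this
        simpa using this.symm
      cases p; simp_all
    simp [this]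
  · simp [h]

theorem pvDedup_append (l : List String) (c : String) :
    pvDedup (l ++ [c]) = if c ∈ pvDedup l then pvDedup l else pvDedup l ++ [c] := by
  simp [pvDedup, List.foldl_append]

-- the simulation map: A's state is B's state with every column list deduped
def pvMap2 (d : PySem.Dict String (PySem.Dict String (List String))) :
    PySem.Dict String (PySem.Dict String (List String)) :=
  pvMapVals (pvMapVals pvDedup) d

-- nodup-keys invariant of the fold state
def pvND (d : PySem.Dict String (PySem.Dict String (List String))) : Prop :=
  d.keys.Nodup ∧ ∀ p ∈ d.items, (Prod.snd p).keys.Nodup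

theorem pvND_empty : pvND PySem.Dict.empty := by
  constructor <;> simp [PySem.Dict.empty, PySem.Dict.keys]

theorem pvND_stepB (d : PySem.Dict String (PySem.Dict String (List String))) (db tb cl : String)
    (h : pvND d) : pvND (pvStepB d db tb cl) := by
  obtain ⟨h1, h2⟩ := h
  constructor
  · exact PySem.Dict.nodup_keys_insert _ _ _ h1
  · intro p hp
    rcases (PySem.Dict.mem_items_insert _ _ _ _).1 hp with he | ⟨hm, _⟩
    · subst he
      apply PySem.Dict.nodup_keys_insert
      rcases hg : d.get? db with _ | inner
      · simp [PySem.Dict.getD, hg, PySem.Dict.empty, PySem.Dict.keys]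
      · simp only [PySem.Dict.getD, hg, Option.getD_some]
        exact h2 _ (PySem.Dict.mem_items_of_get?_eq_some d hg)
    · exact h2 _ hm

theorem pvMap2_insert (d : PySem.Dict String (PySem.Dict String (List String))) (k : String)
    (v : PySem.Dict String (List String)) :
    pvMap2 (d.insert k v) = (pvMap2 d).insert k (pvMapVals pvDedup v) :=
  pvMapVals_insert _ d k v

theorem pvStep_comm (d : PySem.Dict String (PySem.Dict String (List String))) (db tb cl : String)
    (h : pvND d) : pvStepA (pvMap2 d) db tb cl = pvMap2 (pvStepB d db tb cl) := by
  obtain ⟨hnd, hinner⟩ := h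
  by_cases hdb : d.contains db = true
  · -- db present
    rcases hg : d.get? db with _ | innerB
    · rw [PySem.Dict.contains_eq_isSome_get?, hg] at hdb; exact absurd hdb (by simp)
    have hMg : (pvMap2 d).get? db = some (pvMapVals pvDedup innerB) := by
      rw [pvMap2, pvMapVals_get?, hg]; rfl
    have hMc : (pvMap2 d).contains db = true := by
      rw [PySem.Dict.contains_eq_isSome_get?, hMg]; rfl
    have hinnerND : innerB.keys.Nodup :=
      hinner _ (PySem.Dict.mem_items_of_get?_eq_some d hg)
    by_cases htb : innerB.contains tb = true
    · rcases hgt : innerB.get? tb with _ | lstB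
      · rw [PySem.Dict.contains_eq_isSome_get?, hgt] at htb; exact absurd htb (by simp)
      have hIg : (pvMapVals pvDedup innerB).get? tb = some (pvDedup lstB) := by
        rw [pvMapVals_get?, hgt]; rfl
      have hIc : (pvMapVals pvDedup innerB).contains tb = true := by
        rw [PySem.Dict.contains_eq_isSome_get?, hIg]; rfl
      simp only [pvStepA, pvStepB, hMc, if_pos, PySem.Dict.getD, hMg, hg, hgt, hIg,
        Option.getD_some, hIc, pvMap2_insert, pvMapVals_insert, pvDedup_append]
      by_cases hcl : cl ∈ pvDedup lstB
      · rw [if_pos hcl, if_pos hcl,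
            pvInsert_same _ tb _ (by rw [pvMapVals_keys]; exact hinnerND) hIg,
            pvInsert_same _ db _ (by rw [pvMap2, pvMapVals_keys]; exact hnd) hMg]
      · rw [if_neg hcl, if_neg hcl]
    · have htb' : innerB.contains tb = false := by simpa using htb
      have hIc : (pvMapVals pvDedup innerB).contains tb = false := by
        rw [pvMapVals_contains]; exact htb'
      have hgt : innerB.get? tb = none := by
        rw [PySem.Dict.contains_eq_isSome_get?] at htb'
        cases h' : innerB.get? tb with
        | none => rfl
        | some v => rw [h'] at htb'; exact absurd htb' (by simp)
      have hde : pvDedup [cl] = [cl] := rfl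
      simp only [pvStepA, pvStepB, hMc, if_pos, PySem.Dict.getD, hMg, hg, hgt,
        Option.getD_some, Option.getD_none, hIc, Bool.false_eq_true, if_neg, not_false_iff,
        PySem.Dict.get?_insert_self, List.nil_append, List.not_mem_nil,
        pvMap2_insert, pvMapVals_insert, pvInsert_insert_same, hde]
  · -- db absent
    have hdb' : d.contains db = false := by simpa using hdb
    have hMc : (pvMap2 d).contains db = false := by
      rw [pvMap2, pvMapVals_contains]; exact hdb'
    have hg : d.get? db = none := by
      rw [PySem.Dict.contains_eq_isSome_get?] at hdb'
      cases h' : d.get? db with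
      | none => rfl
      | some v => rw [h'] at hdb'; exact absurd hdb' (by simp)
    have hce : (PySem.Dict.empty : PySem.Dict String (List String)).contains tb = false := rfl
    have hge : (PySem.Dict.empty : PySem.Dict String (List String)).get? tb = none := rfl
    have hfe : pvMapVals pvDedup (PySem.Dict.empty : PySem.Dict String (List String)) = PySem.Dict.empty := rfl
    have hde : pvDedup [cl] = [cl] := rfl
    simp only [pvStepA, pvStepB, hMc, Bool.false_eq_true, if_neg, not_false_iff,
      PySem.Dict.getD, hg, Option.getD_none, PySem.Dict.get?_insert_self, Option.getD_some,
      hce, hge, List.nil_append, List.not_mem_nil, pvMap2_insert, pvMapVals_insert,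
      pvInsert_insert_same, hfe, hde]

theorem pvFold_comm (zs : List ((String × String) × String))
    (d : PySem.Dict String (PySem.Dict String (List String))) (h : pvND d) :
    zs.foldl (fun r x => pvStepA r x.1.1 x.1.2 x.2) (pvMap2 d)
      = pvMap2 (zs.foldl (fun r x => pvStepB r x.1.1 x.1.2 x.2) d) := by
  induction zs generalizing d with
  | nil => rfl
  | cons z rest ih =>
      simp only [List.foldl_cons]
      rw [pvStep_comm _ _ _ _ h]
      exact ih _ (pvND_stepB _ _ _ _ h)

-- ===== VERDICT (by name: the statement is the Claim_ definition above) =====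
theorem retr_column_dic_spec : Claim_equal_retr_column_dic := by
  intro rd rt rc _
  unfold Spec_retr_column_dic retr_column_dic retr_column_dic_alt
  have := pvFold_comm ((rd.zip rt).zip rc) PySem.Dict.empty pvND_empty
  have he : pvMap2 PySem.Dict.empty = PySem.Dict.empty := rfl
  rw [he] at this
  rw [this]
  simp [pvMap2, pvMapVals, List.map_map, Function.comp]
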